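-- pv_equiv track=rewrite | github.com/catdeveloperginger/tensor_job_test | other_methods.py | check_str_in
-- ===== SOURCE A (Python) =====
-- def check_str_in(str_main, str_check, count_simbol):
--     s = 0
--     i = 0
--     while i < len(str_check):
--         if str_check[i] in str_main:
--             s += 1
--         i +=1
--     if s  >= count_simbol:
--         return True
--     else:
--         return False
-- ===== SOURCE B (Python) =====
-- from collections import Counter
--
-- def check_str_in(str_main, str_check, count_simbol):
--     freq = Counter(str_check)
--     s = sum(freq[c] for c in set(str_main))
--     return s >= count_simbol
-- ===== Notes on version B (the rewrite author's own statement) =====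
-- stated objective: idiomatic
-- what changed: Instead of scanning str_main once per character of str_check, B builds a Counter of str_check once and sums the tabulated counts over the distinct characters of str_main.
import Mathlib
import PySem

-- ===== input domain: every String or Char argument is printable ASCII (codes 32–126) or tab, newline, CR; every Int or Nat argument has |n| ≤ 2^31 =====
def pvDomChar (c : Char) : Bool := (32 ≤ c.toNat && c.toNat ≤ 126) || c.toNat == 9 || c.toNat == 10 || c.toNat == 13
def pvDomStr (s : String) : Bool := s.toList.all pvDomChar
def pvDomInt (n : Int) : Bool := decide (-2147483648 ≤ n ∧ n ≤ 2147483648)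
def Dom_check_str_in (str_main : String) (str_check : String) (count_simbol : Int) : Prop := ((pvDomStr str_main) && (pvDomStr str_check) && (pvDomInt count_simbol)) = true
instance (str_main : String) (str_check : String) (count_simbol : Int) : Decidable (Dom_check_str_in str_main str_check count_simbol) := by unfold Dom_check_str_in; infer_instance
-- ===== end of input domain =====

-- B builds a frequency table of str_check once and sums counts over str_main's distinct characters (idiomatic, asymptotically faster).


-- ===== PORT A =====
-- while loop over the indices of str_check = left fold over its chars; 'str_check[i] in str_main' = PySem.Chars.isIn (substring test)
def check_str_in (str_main : String) (str_check : String) (count_simbol : Int) : Bool :=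
  let s : Int := str_check.toList.foldl
    (fun s ch => if PySem.Chars.isIn [ch] str_main.toList then s + 1 else s) 0
  if s ≥ count_simbol then true else false

-- ===== PORT B =====
def check_str_in_alt (str_main : String) (str_check : String) (count_simbol : Int) : Bool :=
  let freq := PySem.Dict.counter str_check.toList
  let s : Int := ((PySem.Set.ofList str_main.toList).map (fun ch => freq.getD ch 0)).sum
  decide (s ≥ count_simbol)

-- ===== PRECONDITION & SPEC =====
def Spec_check_str_in (str_main : String) (str_check : String) (count_simbol : Int) (out : Bool) : Prop := out = check_str_in_alt str_main str_check count_simbol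
instance (str_main : String) (str_check : String) (count_simbol : Int) (out : Bool) : Decidable (Spec_check_str_in str_main str_check count_simbol out) := by unfold Spec_check_str_in; infer_instance

-- ===== CLAIM (what is proved, stated in full; the proofs are below) =====
def Claim_equal_check_str_in : Prop := ∀ (str_main : String) (str_check : String) (count_simbol : Int), Dom_check_str_in str_main str_check count_simbol → Spec_check_str_in str_main str_check count_simbol (check_str_in str_main str_check count_simbol)

-- ===== LEMMAS AND PROOFS =====

-- 'ch in s' for a single character is list membership
theorem isIn_singleton_iff (ch : Char) (l : List Char) :
    PySem.Chars.isIn [ch] l = true ↔ ch ∈ l := by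
  rw [PySem.Chars.isIn_iff_infix]
  constructor
  · intro h; exact h.mem (by simp)
  · intro h
    obtain ⟨pre, suf, rfl⟩ := List.mem_iff_append.mp (by simpa using h)
    exact ⟨pre, suf, by simp⟩

-- sum of an indicator over a duplicate-free list
theorem sum_indicator (x : Char) (L : List Char) (h : L.Nodup) :
    ((L.map fun c => if x = c then (1 : Int) else 0).sum) = if x ∈ L then 1 else 0 := by
  induction L with
  | nil => simp
  | cons y ys ih =>
    simp only [List.map_cons, List.sum_cons, List.mem_cons]
    rcases List.nodup_cons.mp h with ⟨hy, hys⟩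
    by_cases hxy : x = y
    · subst hxy
      simp [ih hys, if_neg (fun hm => hy hm)]
    · simp [hxy, ih hys]

-- the sum of per-character counts over a duplicate-free list equals a single countP
theorem sum_counts_eq_countP (check L : List Char) (h : L.Nodup) :
    ((L.map fun c => ((check.count c : Nat) : Int)).sum)
      = ((check.countP fun x => decide (x ∈ L) : Nat) : Int) := by
  induction check with
  | nil => simp
  | cons x rest ih =>
    have : (L.map fun c => (((x :: rest).count c : Nat) : Int))
        = L.map fun c => ((rest.count c : Nat) : Int) + (if x = c then (1 : Int) else 0) := by
      refine List.map_congr_left ?_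
      intro c _
      rw [List.count_cons]
      by_cases hxc : x = c
      · simp [hxc]
      · simp [hxc]
    rw [this, List.sum_map_add, ih, sum_indicator x L h, List.countP_cons]
    by_cases hx : x ∈ L <;> simp [hx]

-- ===== VERDICT (by name: the statement is the Claim_ definition above) =====

theorem check_str_in_spec : Claim_equal_check_str_in := by
  intro str_main str_check count_simbol _
  unfold Spec_check_str_in check_str_in check_str_in_alt
  have hA : str_check.toList.foldl
      (fun s ch => if PySem.Chars.isIn [ch] str_main.toList then s + 1 else s) (0 : Int)
      = ((str_check.toList.countP fun ch => PySem.Chars.isIn [ch] str_main.toList : Nat) : Int) := by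
    simpa using PySem.List.foldl_if_add_one
      (l := str_check.toList) (a := (0 : Int))
      (p := fun ch => PySem.Chars.isIn [ch] str_main.toList)
  have hnodup : (PySem.Set.ofList str_main.toList).Nodup := PySem.Set.nodup_ofList _
  have hB : (((PySem.Set.ofList str_main.toList).map
        (fun ch => (PySem.Dict.counter str_check.toList).getD ch 0)).sum)
      = ((str_check.toList.countP fun x => decide (x ∈ PySem.Set.ofList str_main.toList) : Nat) : Int) := by
    rw [show ((PySem.Set.ofList str_main.toList).map
          (fun ch => (PySem.Dict.counter str_check.toList).getD ch 0))
        = ((PySem.Set.ofList str_main.toList).map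
          (fun ch => ((str_check.toList.count ch : Nat) : Int))) from
        List.map_congr_left (fun c _ => by
          simpa using PySem.Dict.getD_counter (xs := str_check.toList) (v := c))]
    exact sum_counts_eq_countP _ _ hnodup
  have hP : (fun ch => PySem.Chars.isIn [ch] str_main.toList)
      = fun x => decide (x ∈ PySem.Set.ofList str_main.toList) := by
    funext x
    by_cases hx : x ∈ str_main.toList
    · simp [(isIn_singleton_iff x str_main.toList).mpr hx, PySem.Set.mem_ofList, hx]
    · have : PySem.Chars.isIn [x] str_main.toList = false := by
        by_contra h
        exact hx ((isIn_singleton_iff x str_main.toList).mp (by simpa using h))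
      simp [this, PySem.Set.mem_ofList, hx]
  simp only [hA, hB, hP]
  split <;> simp_all
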